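-- pv_equiv track=rewrite | github.com/NGKsSystems/NGKsDevFabEco | NGKsDevFabric/src/ngksdevfabric/ngk_fabric/resolution_tracking.py | _resolution_streak_lengths
-- ===== SOURCE A (Python) =====
-- def _resolution_streak_lengths(presence_runs: list[int], latest_run_num: int) -> list[int]:
--     if not presence_runs:
--         return []
--
--     values = sorted(set(presence_runs))
--     streaks: list[tuple[int, int]] = []
--     start = values[0]
--     prev = values[0]
--     for run_num in values[1:]:
--         if run_num == prev + 1:
--             prev = run_num
--             continue
--         streaks.append((start, prev))
--         start = run_num
--         prev = run_num
--     streaks.append((start, prev))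
--
--     resolved_lengths: list[int] = []
--     for start_num, end_num in streaks:
--         # If a streak does not reach the latest run, it has been resolved.
--         if end_num < latest_run_num:
--             resolved_lengths.append(max(1, end_num - start_num + 1))
--     return resolved_lengths
-- ===== SOURCE B (Python) =====
-- def _resolution_streak_lengths(presence_runs: list[int], latest_run_num: int) -> list[int]:
--     # Boundary detection via set membership: a value starts a maximal consecutive
--     # streak iff value-1 is absent, ends one iff value+1 is absent; the sorted
--     # boundary lists pair up positionally, so no adjacency scan is needed.
--     runs = set(presence_runs)
--     starts = sorted(v for v in runs if v - 1 not in runs)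
--     ends = sorted(v for v in runs if v + 1 not in runs)
--     return [e - s + 1 for s, e in zip(starts, ends) if e < latest_run_num]
-- ===== Notes on version B (the rewrite author's own statement) =====
-- stated objective: alternative
-- what changed: Replaces A's sorted-adjacent-difference scan (start/prev accumulator building (start,end) streak tuples) by hash-set boundary detection: streak starts are the values whose predecessor is absent from the set, streak ends those whose successor is absent, and the two sorted boundary lists are zipped positionally to get the lengths.
import Mathlib
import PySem

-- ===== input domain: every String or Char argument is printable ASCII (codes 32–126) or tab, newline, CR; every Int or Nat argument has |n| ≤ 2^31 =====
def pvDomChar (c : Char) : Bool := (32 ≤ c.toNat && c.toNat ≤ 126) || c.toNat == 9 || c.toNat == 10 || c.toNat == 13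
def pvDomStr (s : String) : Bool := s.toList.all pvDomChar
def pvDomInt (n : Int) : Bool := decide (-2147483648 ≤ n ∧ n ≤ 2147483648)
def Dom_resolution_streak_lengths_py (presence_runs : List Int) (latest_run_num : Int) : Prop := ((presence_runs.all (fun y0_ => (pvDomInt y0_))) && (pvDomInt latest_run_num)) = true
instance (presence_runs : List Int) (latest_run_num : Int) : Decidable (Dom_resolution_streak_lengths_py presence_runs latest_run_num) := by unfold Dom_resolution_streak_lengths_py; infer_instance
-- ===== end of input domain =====

-- B replaces A's sorted-adjacent-difference scan by set-membership boundary detection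
-- (starts = values whose predecessor is absent, ends = values whose successor is absent,
-- zipped positionally); return values are identical (alternative algorithm, same cost).

-- ===== PORT A =====
-- A's for-loop over values[1:], state (start, prev, streaks)
def pvLoopA (start prev : Int) (rest : List Int) (acc : List (Int × Int)) : List (Int × Int) :=
  match rest with
  | [] => acc ++ [(start, prev)]
  | r :: rs =>
    if r = prev + 1 then pvLoopA start r rs acc
    else pvLoopA r r rs (acc ++ [(start, prev)])

def resolution_streak_lengths_py (presence_runs : List Int) (latest_run_num : Int) : List Int :=
  if presence_runs = [] then []
  else
    let values := PySem.List.sorted (PySem.Set.ofList presence_runs) (fun x => x) false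
    match values with
    | [] => []  -- unreachable: values is nonempty when presence_runs ≠ []
    | v0 :: rest =>
      let streaks := pvLoopA v0 v0 rest []
      streaks.foldl (fun racc se =>
        if se.2 < latest_run_num then racc ++ [max 1 (se.2 - se.1 + 1)] else racc) []

-- ===== PORT B =====
def resolution_streak_lengths_py_alt (presence_runs : List Int) (latest_run_num : Int) : List Int :=
  let runs := PySem.Set.ofList presence_runs
  let starts := PySem.List.sorted (runs.filter (fun v => !(PySem.Set.contains runs (v - 1)))) (fun x => x) false
  let ends := PySem.List.sorted (runs.filter (fun v => !(PySem.Set.contains runs (v + 1)))) (fun x => x) false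
  ((starts.zip ends).filter (fun p => p.2 < latest_run_num)).map (fun p => p.2 - p.1 + 1)

-- ===== PRECONDITION & SPEC =====
def Spec_resolution_streak_lengths_py (presence_runs : List Int) (latest_run_num : Int) (out : List Int) : Prop := out = resolution_streak_lengths_py_alt presence_runs latest_run_num
instance (presence_runs : List Int) (latest_run_num : Int) (out : List Int) : Decidable (Spec_resolution_streak_lengths_py presence_runs latest_run_num out) := by unfold Spec_resolution_streak_lengths_py; infer_instance

-- ===== CLAIM (what is proved, stated in full; the proofs are below) =====
def Claim_equal_resolution_streak_lengths_py : Prop := ∀ (presence_runs : List Int) (latest_run_num : Int), Dom_resolution_streak_lengths_py presence_runs latest_run_num → Spec_resolution_streak_lengths_py presence_runs latest_run_num (resolution_streak_lengths_py presence_runs latest_run_num)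

-- ===== LEMMAS AND PROOFS =====

-- common reference: maximal runs of consecutive integers
def pvChunkStep (v w : Int) : List (List Int) → List (List Int)
  | [] => [[v]]
  | c :: cs => if w = v + 1 then (v :: c) :: cs else [v] :: c :: cs

def pvChunks : List Int → List (List Int)
  | [] => []
  | [v] => [[v]]
  | v :: w :: rest => pvChunkStep v w (pvChunks (w :: rest))

def pvPair (c : List Int) : Int × Int := (c.headD 0, c.getLastD 0)

theorem pvChunks_head (x : Int) (xs : List Int) :
    ∃ t cs, pvChunks (x :: xs) = (x :: t) :: cs := by
  cases xs with
  | nil => exact ⟨[], [], rfl⟩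
  | cons y rest =>
    rw [show pvChunks (x :: y :: rest) = pvChunkStep x y (pvChunks (y :: rest)) from rfl]
    cases pvChunks (y :: rest) with
    | nil => exact ⟨[], [], rfl⟩
    | cons c cs =>
      by_cases h : y = x + 1
      · exact ⟨c, cs, by simp [pvChunkStep, h]⟩
      · exact ⟨[], c :: cs, by simp [pvChunkStep, h]⟩

theorem pvLoopA_acc (rest : List Int) :
    ∀ start prev acc, pvLoopA start prev rest acc = acc ++ pvLoopA start prev rest [] := by
  induction rest with
  | nil => intro start prev acc; simp [pvLoopA]
  | cons r rs ih =>
    intro start prev acc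
    by_cases h : r = prev + 1
    · simp only [pvLoopA, if_pos h]
      exact ih start r acc
    · simp only [pvLoopA, if_neg h]
      rw [ih r r (acc ++ [(start, prev)]), ih r r ([] ++ [(start, prev)])]
      simp

-- A's loop computes (start, lastOfFirstChunk) followed by the head/last pairs of the rest
theorem pvLoopA_chunks (rest : List Int) :
    ∀ start prev, pvLoopA start prev rest [] =
      match pvChunks (prev :: rest) with
      | [] => []
      | c :: cs => (start, c.getLastD 0) :: cs.map pvPair := by
  induction rest with
  | nil => intro start prev; simp [pvLoopA, pvChunks]
  | cons r rs ih =>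
    intro start prev
    obtain ⟨t, cs, hc⟩ := pvChunks_head r rs
    have hstep : pvChunks (prev :: r :: rs) = pvChunkStep prev r (pvChunks (r :: rs)) := rfl
    by_cases h : r = prev + 1
    · have hch : pvChunks (prev :: r :: rs) = (prev :: r :: t) :: cs := by
        rw [hstep, hc]; simp [pvChunkStep, h]
      rw [hch]
      simp only [pvLoopA, if_pos h]
      rw [ih start r, hc]
      simp
    · have hch : pvChunks (prev :: r :: rs) = [prev] :: (r :: t) :: cs := by
        rw [hstep, hc]; simp [pvChunkStep, h]
      rw [hch]
      simp only [pvLoopA, if_neg h]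
      rw [pvLoopA_acc, ih r r, hc]
      simp [pvPair]

theorem pvStreaksA_eq (v0 : Int) (rest : List Int) :
    pvLoopA v0 v0 rest [] = (pvChunks (v0 :: rest)).map pvPair := by
  obtain ⟨t, cs, hc⟩ := pvChunks_head v0 rest
  rw [pvLoopA_chunks, hc]
  simp [pvPair]

theorem pvChunks_ne_nil_mem (xs : List Int) : ∀ c ∈ pvChunks xs, c ≠ [] := by
  induction xs with
  | nil => simp [pvChunks]
  | cons x xs ih =>
    cases xs with
    | nil => simp [pvChunks]
    | cons y rest =>
      intro c hc
      rw [show pvChunks (x :: y :: rest) = pvChunkStep x y (pvChunks (y :: rest)) from rfl] at hc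
      cases hcy : pvChunks (y :: rest) with
      | nil => rw [hcy] at hc; simp [pvChunkStep] at hc; simp [hc]
      | cons c0 cs0 =>
        rw [hcy] at hc
        by_cases h : y = x + 1
        · rw [show pvChunkStep x y (c0 :: cs0) = (x :: c0) :: cs0 by simp [pvChunkStep, h]] at hc
          rcases List.mem_cons.mp hc with h1 | h1
          · simp [h1]
          · exact ih c (hcy ▸ List.mem_cons_of_mem c0 h1)
        · rw [show pvChunkStep x y (c0 :: cs0) = [x] :: c0 :: cs0 by simp [pvChunkStep, h]] at hc
          rcases List.mem_cons.mp hc with h1 | h1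
          · simp [h1]
          · exact ih c (hcy ▸ h1)

theorem pvChunks_flatten (xs : List Int) : (pvChunks xs).flatten = xs := by
  induction xs with
  | nil => simp [pvChunks]
  | cons x ys ih =>
    cases ys with
    | nil => simp [pvChunks]
    | cons y rest =>
      obtain ⟨t, cs, hc⟩ := pvChunks_head y rest
      have hstep : pvChunks (x :: y :: rest) = pvChunkStep x y (pvChunks (y :: rest)) := rfl
      rw [hc] at ih
      by_cases h : y = x + 1
      · rw [hstep, hc, show pvChunkStep x y ((y :: t) :: cs) = (x :: y :: t) :: cs by
          simp [pvChunkStep, h]]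
        simpa using ih
      · rw [hstep, hc, show pvChunkStep x y ((y :: t) :: cs) = [x] :: (y :: t) :: cs by
          simp [pvChunkStep, h]]
        simpa using ih

theorem pvContains_cons_of_ne (x v : Int) (l : List Int) (h : v ≠ x) :
    ((x :: l).contains v) = (l.contains v) := by
  rw [Bool.eq_iff_iff]
  simp [h]

-- on a strictly increasing list, the chunk heads are exactly the values whose
-- predecessor is absent
theorem pvHeads_eq_filter (xs : List Int) (h : xs.Pairwise (· < ·)) :
    xs.filter (fun v => !(xs.contains (v - 1))) = (pvChunks xs).map (fun c => c.headD 0) := by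
  induction xs with
  | nil => simp [pvChunks]
  | cons x ys ih =>
    cases ys with
    | nil =>
      have : ¬ (x - 1 = x) := by omega
      simp [pvChunks, this]
    | cons y rest =>
      rw [List.pairwise_cons] at h
      have hlt : ∀ a ∈ y :: rest, x < a := h.1
      have hxy : x < y := hlt y (by simp)
      have hyr : ∀ v ∈ rest, y < v := (List.pairwise_cons.mp h.2).1
      have ih' := ih h.2
      obtain ⟨t, cs, hc⟩ := pvChunks_head y rest
      have hstep : pvChunks (x :: y :: rest) = pvChunkStep x y (pvChunks (y :: rest)) := rfl
      -- x is kept: its predecessor is below every element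
      have hxkeep : ¬ (x - 1 ∈ x :: y :: rest) := by
        intro hm
        rcases List.mem_cons.mp hm with h1 | h2
        · omega
        · have := hlt _ h2; omega
      rw [List.filter_cons, if_pos (by simpa using hxkeep)]
      by_cases h1 : y = x + 1
      · -- same chunk: y is dropped from the big filter, kept as the head of the tail filter
        have hykeep : ¬ (y - 1 ∈ y :: rest) := by
          intro hm
          rcases List.mem_cons.mp hm with h2 | h2
          · omega
          · have := hyr _ h2; omega
        rw [List.filter_cons, if_pos (by simpa using hykeep), hc] at ih'
        simp only [List.map_cons, List.headD_cons] at ih'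
        have htail := (List.cons.injEq _ _ _ _).mp ih'
        have hcong : ∀ v ∈ rest, (!((x :: y :: rest).contains (v - 1))) =
            (!((y :: rest).contains (v - 1))) := by
          intro v hv
          have hvy := hyr v hv
          rw [pvContains_cons_of_ne x (v - 1) _ (by omega)]
        rw [List.filter_cons, if_neg (by simp [show y - 1 = x by omega]), List.filter_congr hcong,
          htail.2, hstep, hc,
          show pvChunkStep x y ((y :: t) :: cs) = (x :: y :: t) :: cs by simp [pvChunkStep, h1]]
        simp
      · -- gap: every later predecessor stays above x, so the big filter agrees with the tail one
        have hgap : x + 1 < y := by omega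
        have hcong : ∀ v ∈ y :: rest, (!((x :: y :: rest).contains (v - 1))) =
            (!((y :: rest).contains (v - 1))) := by
          intro v hv
          have hvx : x < v - 1 := by
            rcases List.mem_cons.mp hv with h2 | h2
            · omega
            · have := hyr _ h2; omega
          rw [pvContains_cons_of_ne x (v - 1) _ (by omega)]
        rw [List.filter_congr hcong, ih', hstep, hc,
          show pvChunkStep x y ((y :: t) :: cs) = [x] :: (y :: t) :: cs by simp [pvChunkStep, h1]]
        simp

-- … and the chunk last elements are exactly those whose successor is absent
theorem pvLasts_eq_filter (xs : List Int) (h : xs.Pairwise (· < ·)) :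
    xs.filter (fun v => !(xs.contains (v + 1))) = (pvChunks xs).map (fun c => c.getLastD 0) := by
  induction xs with
  | nil => simp [pvChunks]
  | cons x ys ih =>
    cases ys with
    | nil =>
      have : ¬ (x + 1 = x) := by omega
      simp [pvChunks, this]
    | cons y rest =>
      rw [List.pairwise_cons] at h
      have hlt : ∀ a ∈ y :: rest, x < a := h.1
      have hxy : x < y := hlt y (by simp)
      have hyr : ∀ v ∈ rest, y < v := (List.pairwise_cons.mp h.2).1
      have ih' := ih h.2
      obtain ⟨t, cs, hc⟩ := pvChunks_head y rest
      have hstep : pvChunks (x :: y :: rest) = pvChunkStep x y (pvChunks (y :: rest)) := rfl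
      -- successors of later values never land on x
      have hcong : ∀ v ∈ y :: rest, (!((x :: y :: rest).contains (v + 1))) =
          (!((y :: rest).contains (v + 1))) := by
        intro v hv
        have hvx : x < v + 1 := by have := hlt v hv; omega
        rw [pvContains_cons_of_ne x (v + 1) _ (by omega)]
      by_cases h1 : y = x + 1
      · -- same chunk: x is dropped, and prepending x leaves every chunk's last unchanged
        rw [List.filter_cons, if_neg (by simp [show x + 1 = y by omega]), List.filter_congr hcong, ih',
          hstep, hc,
          show pvChunkStep x y ((y :: t) :: cs) = (x :: y :: t) :: cs by simp [pvChunkStep, h1]]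
        simp
      · -- gap: x ends its own singleton chunk
        have hxkeep : ¬ (x + 1 ∈ x :: y :: rest) := by
          intro hm
          rcases List.mem_cons.mp hm with h2 | h2
          · omega
          · rcases List.mem_cons.mp h2 with h3 | h3
            · omega
            · have := hyr _ h3; omega
        rw [List.filter_cons, if_pos (by simpa using hxkeep), List.filter_congr hcong, ih',
          hstep, hc,
          show pvChunkStep x y ((y :: t) :: cs) = [x] :: (y :: t) :: cs by simp [pvChunkStep, h1]]
        simp

theorem values_ne_nil (presence_runs : List Int) (h : presence_runs ≠ []) :
    PySem.List.sorted (PySem.Set.ofList presence_runs) (fun x => x) false ≠ [] := by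
  intro hnil
  rw [PySem.List.sorted_eq_nil_iff] at hnil
  cases presence_runs with
  | nil => exact h rfl
  | cons a l =>
    have : a ∈ PySem.Set.ofList (a :: l) := (PySem.Set.mem_ofList (a :: l) a).mpr (by simp)
    rw [hnil] at this; simp at this

theorem pvHead_le_getLast (c : List Int) (hne : c ≠ []) (hpw : c.Pairwise (· < ·)) :
    c.headD 0 ≤ c.getLastD 0 := by
  cases c with
  | nil => exact absurd rfl hne
  | cons a t =>
    cases t with
    | nil => simp
    | cons b u =>
      have h1 := (List.pairwise_cons.mp hpw).1
      have hmem : (b :: u).getLastD a ∈ b :: u := List.mem_of_getLast? rfl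
      have := h1 _ hmem
      simp only [List.getLastD_cons] at this ⊢
      simp only [List.headD_cons]
      omega

-- ===== VERDICT (by name: the statement is the Claim_ definition above) =====
theorem resolution_streak_lengths_py_spec : Claim_equal_resolution_streak_lengths_py := by
  intro pr latest _
  unfold Spec_resolution_streak_lengths_py
  unfold resolution_streak_lengths_py resolution_streak_lengths_py_alt
  by_cases hp : pr = []
  · subst hp; rfl
  · rw [if_neg hp]
    cases hv : PySem.List.sorted (PySem.Set.ofList pr) (fun x => x) false with
    | nil => exact absurd hv (values_ne_nil pr hp)
    | cons v0 rest =>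
      have hperm : (v0 :: rest).Perm (PySem.Set.ofList pr) := by
        rw [← hv]; exact PySem.List.sorted_perm _ _ _
      have hpw : (v0 :: rest).Pairwise (· < ·) := by
        rw [← hv]; exact PySem.List.sorted_ofList_pairwise_lt pr
      -- the two membership tests agree
      have hcont : ∀ a : Int, PySem.Set.contains (PySem.Set.ofList pr) a =
          ((v0 :: rest).contains a) := by
        intro a
        rw [Bool.eq_iff_iff]
        simp [hperm.mem_iff]
      -- B's sorted filtered sets are named by their counterparts over the sorted values
      have hb : ∀ (p q : Int → Bool), (∀ v, p v = q v) →
          PySem.List.sorted ((PySem.Set.ofList pr).filter p) (fun x => x) false =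
            (v0 :: rest).filter q := by
        intro p q hpq
        have h2 : (PySem.Set.ofList pr).filter p = (PySem.Set.ofList pr).filter q :=
          List.filter_congr (fun v _ => hpq v)
        rw [h2]
        exact PySem.List.sorted_eq_of_perm_of_pairwise_lt _ _ _ (hperm.filter q)
          (List.Pairwise.sublist List.filter_sublist hpw)
      have hstarts : PySem.List.sorted
          ((PySem.Set.ofList pr).filter
            (fun v => !(PySem.Set.contains (PySem.Set.ofList pr) (v - 1))))
          (fun x => x) false = (pvChunks (v0 :: rest)).map (fun c => c.headD 0) := by
        rw [hb _ (fun v => !((v0 :: rest).contains (v - 1))) (fun v => by rw [hcont])]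
        exact pvHeads_eq_filter (v0 :: rest) hpw
      have hends : PySem.List.sorted
          ((PySem.Set.ofList pr).filter
            (fun v => !(PySem.Set.contains (PySem.Set.ofList pr) (v + 1))))
          (fun x => x) false = (pvChunks (v0 :: rest)).map (fun c => c.getLastD 0) := by
        rw [hb _ (fun v => !((v0 :: rest).contains (v + 1))) (fun v => by rw [hcont])]
        exact pvLasts_eq_filter (v0 :: rest) hpw
      dsimp only
      rw [hstarts, hends, pvStreaksA_eq, List.zip_map']
      have hfold := PySem.List.foldl_append_if
        (p := fun se : Int × Int => decide (se.2 < latest))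
        (f := fun se : Int × Int => max 1 (se.2 - se.1 + 1))
        (l := (pvChunks (v0 :: rest)).map pvPair) (acc := ([] : List Int))
      simp only [List.nil_append, decide_eq_true_eq] at hfold
      rw [hfold]
      simp only [List.filter_map, List.map_map]
      simp only [pvPair, Function.comp_def]
      apply List.map_congr_left
      intro c hc
      have hcm : c ∈ pvChunks (v0 :: rest) := List.mem_of_mem_filter hc
      have hne := pvChunks_ne_nil_mem _ _ hcm
      have hsub : c.Sublist (v0 :: rest) := by
        have := List.sublist_flatten_of_mem hcm
        rwa [pvChunks_flatten] at this
      have hle := pvHead_le_getLast c hne (List.Pairwise.sublist hsub hpw)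
      omega
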